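-- pv_equiv track=rewrite | github.com/tauqeerahmed0309/reengage-env | verifier/safety_checks.py | repeated_contact_spam
-- ===== SOURCE A (Python) =====
-- from typing import Any, Dict, List
--
-- CONTACT_ACTIONS = {0, 1, 2, 3, 4}
--
-- def is_contact_action(action: int) -> bool:
--     return action in CONTACT_ACTIONS
--
-- def repeated_contact_spam(
--     actions: List[int],
--     max_repeats: int = 3,
-- ) -> bool:
--     repeated = 0
--     last_action = None
--
--     for action in actions:
--         if is_contact_action(action):
--             if action == last_action:
--                 repeated += 1
--             else:
--                 repeated = 1
--
--             if repeated > max_repeats: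
--                 return True
--
--             last_action = action
--         else:
--             repeated = 0
--             last_action = None
--
--     return False
-- ===== SOURCE B (Python) =====
-- from itertools import groupby
-- from typing import List
--
-- CONTACT_ACTIONS = {0, 1, 2, 3, 4}
--
-- def is_contact_action(action: int) -> bool:
--     return action in CONTACT_ACTIONS
--
-- def repeated_contact_spam(actions: List[int], max_repeats: int = 3) -> bool:
--     for key, group in groupby(actions):
--         if is_contact_action(key) and sum(1 for _ in group) > max_repeats:
--             return True
--     return False
-- ===== Notes on version B (the rewrite author's own statement) =====
-- stated objective: idiomatic
-- what changed: Replaces the explicit repeated/last_action counter state machine with itertools.groupby over maximal runs of equal consecutive actions, reporting True when a contact-action run's length exceeds max_repeats.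
import Mathlib
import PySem

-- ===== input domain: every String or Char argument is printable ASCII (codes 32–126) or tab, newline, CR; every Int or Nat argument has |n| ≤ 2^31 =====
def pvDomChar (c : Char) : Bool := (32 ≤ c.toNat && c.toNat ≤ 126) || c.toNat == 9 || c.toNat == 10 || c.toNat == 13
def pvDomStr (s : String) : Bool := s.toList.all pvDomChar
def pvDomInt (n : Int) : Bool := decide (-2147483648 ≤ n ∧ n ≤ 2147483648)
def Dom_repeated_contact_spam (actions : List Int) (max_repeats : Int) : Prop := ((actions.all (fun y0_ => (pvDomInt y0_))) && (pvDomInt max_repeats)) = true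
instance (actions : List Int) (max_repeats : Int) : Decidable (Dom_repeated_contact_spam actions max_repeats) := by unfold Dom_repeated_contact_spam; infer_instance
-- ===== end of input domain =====

-- B replaces A's repeated/last_action counter state machine by grouping maximal
-- runs of equal consecutive actions (itertools.groupby) — idiomatic, same cost.

-- ===== PORT A =====
-- `action in CONTACT_ACTIONS` with CONTACT_ACTIONS = {0,1,2,3,4}
def is_contact_action (action : Int) : Bool :=
  action == 0 || action == 1 || action == 2 || action == 3 || action == 4

-- A's loop with early return: state is (repeated, last_action)
def pvALoop (actions : List Int) (max_repeats : Int) (repeated : Int)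
    (last_action : Option Int) : Bool :=
  match actions with
  | [] => false
  | action :: rest =>
    if is_contact_action action then
      let repeated' := if some action == last_action then repeated + 1 else 1
      if repeated' > max_repeats then true
      else pvALoop rest max_repeats repeated' (some action)
    else
      pvALoop rest max_repeats 0 none

def repeated_contact_spam (actions : List Int) (max_repeats : Int) : Bool :=
  pvALoop actions max_repeats 0 none

-- ===== PORT B =====
-- groupby: each step takes the maximal run of elements equal to the head
def repeated_contact_spam_alt (actions : List Int) (max_repeats : Int) : Bool :=
  match actions with
  | [] => false
  | key :: rest =>
    if is_contact_action key && ((1 + (rest.takeWhile (· == key)).length : Int) > max_repeats) then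
      true
    else
      repeated_contact_spam_alt (rest.dropWhile (· == key)) max_repeats
termination_by actions.length
decreasing_by
  simp only [List.length_cons]
  exact Nat.lt_succ_of_le (List.length_dropWhile_le _ rest)

-- ===== PRECONDITION & SPEC =====
def Spec_repeated_contact_spam (actions : List Int) (max_repeats : Int) (out : Bool) : Prop := out = repeated_contact_spam_alt actions max_repeats
instance (actions : List Int) (max_repeats : Int) (out : Bool) : Decidable (Spec_repeated_contact_spam actions max_repeats out) := by unfold Spec_repeated_contact_spam; infer_instance

-- ===== CLAIM (what is proved, stated in full; the proofs are below) =====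
def Claim_equal_repeated_contact_spam : Prop := ∀ (actions : List Int) (max_repeats : Int), Dom_repeated_contact_spam actions max_repeats → Spec_repeated_contact_spam actions max_repeats (repeated_contact_spam actions max_repeats)

-- ===== LEMMAS AND PROOFS =====

lemma alt_nil (m : Int) : repeated_contact_spam_alt [] m = false := by
  rw [repeated_contact_spam_alt]

lemma alt_cons (a : Int) (rest : List Int) (m : Int) :
    repeated_contact_spam_alt (a :: rest) m
      = (if is_contact_action a && decide ((1 + ((rest.takeWhile (· == a)).length : Int)) > m)
         then true
         else repeated_contact_spam_alt (rest.dropWhile (· == a)) m) := by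
  rw [repeated_contact_spam_alt]

-- After a run ends (t empty or its head differs from a), the carried state is irrelevant.
lemma pvALoop_reset (t : List Int) (m rep : Int) (a : Int)
    (h : ∀ d t', t = d :: t' → d ≠ a) :
    pvALoop t m rep (some a) = pvALoop t m 0 none := by
  cases t with
  | nil => rfl
  | cons d t' =>
    have hd : d ≠ a := h d t' rfl
    simp [pvALoop, hd]

-- Processing a run of copies of a non-contact action leaves the state at (0, none).
lemma pvALoop_skip_nc (run : List Int) (t : List Int) (m : Int) (a : Int)
    (hnc : is_contact_action a = false) (hall : ∀ x ∈ run, x = a) :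
    pvALoop (run ++ t) m 0 none = pvALoop t m 0 none := by
  induction run with
  | nil => rfl
  | cons x xs ih =>
    have hx : x = a := hall x (by simp)
    subst hx
    have hstep : pvALoop (x :: (xs ++ t)) m 0 none = pvALoop (xs ++ t) m 0 none := by
      simp [pvALoop, hnc]
    rw [List.cons_append, hstep]
    exact ih (fun y hy => hall y (List.mem_cons_of_mem _ hy))

-- Processing a run of copies of a contact action a from state (rep, some a):
-- true iff the run pushes the counter past m, else continue after the run, state reset.
lemma pvALoop_run (run : List Int) (t : List Int) (m : Int) (a : Int)
    (hc : is_contact_action a = true)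
    (ht : ∀ d t', t = d :: t' → d ≠ a) :
    ∀ rep : Int, (∀ x ∈ run, x = a) → rep ≤ m →
    pvALoop (run ++ t) m rep (some a)
      = (if (rep + run.length : Int) > m then true else pvALoop t m 0 none) := by
  induction run with
  | nil =>
    intro rep _ hrep
    simp only [List.nil_append, List.length_nil, Int.natCast_zero, add_zero]
    rw [if_neg (by omega)]
    exact pvALoop_reset t m rep a ht
  | cons x xs ih =>
    intro rep hall hrep
    have hx : x = a := hall x (by simp)
    subst hx
    have hstep : pvALoop (x :: (xs ++ t)) m rep (some x)
        = (if rep + 1 > m then true else pvALoop (xs ++ t) m (rep + 1) (some x)) := by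
      simp [pvALoop, hc]
    rw [List.cons_append, hstep]
    by_cases hgt : rep + 1 > m
    · rw [if_pos hgt, if_pos (by
        have : (0:Int) ≤ (xs.length : Int) := Int.natCast_nonneg _
        push_cast [List.length_cons]; omega)]
    · rw [if_neg hgt, ih (rep + 1) (fun y hy => hall y (List.mem_cons_of_mem _ hy)) (by omega)]
      by_cases h2 : rep + 1 + (xs.length : Int) > m
      · rw [if_pos h2, if_pos (by push_cast [List.length_cons]; omega)]
      · rw [if_neg h2, if_neg (by push_cast [List.length_cons]; omega)]

lemma dropWhile_head_ne (a : Int) (rest : List Int) :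
    ∀ d t', rest.dropWhile (· == a) = d :: t' → d ≠ a := by
  intro d t' h hda
  have := List.head?_dropWhile_not (p := (· == a)) rest
  rw [h] at this
  simp [hda] at this

-- Main equivalence, by strong induction on the list length.
lemma pvMain (n : Nat) : ∀ (l : List Int) (m : Int), l.length ≤ n →
    pvALoop l m 0 none = repeated_contact_spam_alt l m := by
  induction n with
  | zero =>
    intro l m hl
    have : l = [] := List.eq_nil_of_length_eq_zero (Nat.le_zero.mp hl)
    subst this
    rw [alt_nil]; rfl
  | succ n ih =>
    intro l m hl
    cases l with
    | nil => rw [alt_nil]; rfl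
    | cons a rest =>
      have hsplit : rest = rest.takeWhile (· == a) ++ rest.dropWhile (· == a) :=
        (List.takeWhile_append_dropWhile).symm
      have hall : ∀ x ∈ rest.takeWhile (· == a), x = a := by
        intro x hx
        simpa using List.mem_takeWhile_imp hx
      have htail : (rest.dropWhile (· == a)).length ≤ n := by
        have h1 := List.length_dropWhile_le (p := (· == a)) rest
        simp only [List.length_cons] at hl
        omega
      rw [alt_cons]
      by_cases hc : is_contact_action a = true
      · -- contact head
        have hstep : pvALoop (a :: rest) m 0 none
            = (if (1:Int) > m then true else pvALoop rest m 1 (some a)) := by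
          simp [pvALoop, hc]
        rw [hstep]
        by_cases h1 : (1:Int) > m
        · rw [if_pos h1, if_pos (by
            simp only [hc, Bool.true_and, decide_eq_true_eq]
            have : (0:Int) ≤ ((rest.takeWhile (· == a)).length : Int) := Int.natCast_nonneg _
            omega)]
        · rw [if_neg h1]
          conv_lhs => rw [hsplit]
          rw [pvALoop_run _ _ m a hc (dropWhile_head_ne a rest) 1 hall (by omega)]
          rw [ih _ m htail]
          by_cases hrun : (1 + ((rest.takeWhile (· == a)).length : Int) > m)
          · rw [if_pos (by omega), if_pos (by simp [hc, hrun])]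
          · rw [if_neg (by omega), if_neg (by simp [hc, hrun])]
      · -- non-contact head
        have hcf : is_contact_action a = false := by simpa using hc
        have hstep : pvALoop (a :: rest) m 0 none = pvALoop rest m 0 none := by
          simp [pvALoop, hcf]
        rw [hstep, if_neg (by simp [hcf])]
        conv_lhs => rw [hsplit]
        rw [pvALoop_skip_nc _ _ m a hcf hall]
        exact ih _ m htail

-- ===== VERDICT (by name: the statement is the Claim_ definition above) =====
theorem repeated_contact_spam_spec : Claim_equal_repeated_contact_spam := by
  intro actions max_repeats _
  unfold Spec_repeated_contact_spam repeated_contact_spam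
  exact pvMain actions.length actions max_repeats le_rfl
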